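-- pv_equiv track=rewrite | github.com/ArminWiebigke/networkit | egosplit/plot_scripts/draw_plot.py | legend_too_long
-- ===== SOURCE A (Python) =====
-- def legend_too_long(labels, num_columns):
-- 	if num_columns == 1:
-- 		return False
-- 	max_width = 90 - 9 * num_columns
-- 	for line in [labels[i:i + num_columns] for i in range(0, len(labels), num_columns)]:
-- 		length = sum([len(l) for l in line])
-- 		if length > max_width:
-- 			return True
-- 	return False
-- ===== SOURCE B (Python) =====
-- def legend_too_long(labels, num_columns):
-- 	if num_columns < 2:
-- 		return False
-- 	max_width = 90 - 9 * num_columns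
-- 	row_len = 0
-- 	pos = 0
-- 	for l in labels:
-- 		row_len += len(l)
-- 		pos += 1
-- 		if pos == num_columns:
-- 			if row_len > max_width:
-- 				return True
-- 			row_len = 0
-- 			pos = 0
-- 	return pos > 0 and row_len > max_width
-- ===== Notes on version B (the rewrite author's own statement) =====
-- stated objective: alternative
-- what changed: One streaming pass over the labels with a running row total and a position counter, instead of materializing every row as a slice of a chunk list and summing each slice.
import Mathlib
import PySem

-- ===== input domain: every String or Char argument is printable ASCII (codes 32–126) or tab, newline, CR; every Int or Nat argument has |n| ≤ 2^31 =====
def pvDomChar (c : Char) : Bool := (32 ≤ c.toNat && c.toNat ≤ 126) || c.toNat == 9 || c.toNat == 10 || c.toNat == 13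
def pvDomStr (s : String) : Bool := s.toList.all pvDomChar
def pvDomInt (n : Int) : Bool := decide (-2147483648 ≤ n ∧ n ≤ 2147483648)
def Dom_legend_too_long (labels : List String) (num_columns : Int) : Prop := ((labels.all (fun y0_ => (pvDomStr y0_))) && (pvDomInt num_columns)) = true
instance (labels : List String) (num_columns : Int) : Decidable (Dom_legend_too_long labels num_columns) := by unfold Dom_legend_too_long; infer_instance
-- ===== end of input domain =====

-- B is a single streaming pass with a running row total instead of building chunk slices (alternative decomposition, same cost).

-- ===== PORT A =====
def legend_too_long (labels : List String) (num_columns : Int) : Bool :=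
  if num_columns == 1 then false
  else
    let max_width := 90 - 9 * num_columns
    let lines := (PySem.List.pyRange 0 (PySem.List.len labels) num_columns).map
      (fun i => PySem.List.slice labels (some i) (some (i + num_columns)))
    lines.any (fun line => decide ((line.map (fun l => PySem.Str.len l)).sum > max_width))

-- ===== PORT B =====
def bRows (max_width num_columns : Int) : List String → Int → Int → Bool
  | [], row_len, pos => decide (pos > 0) && decide (row_len > max_width)
  | l :: rest, row_len, pos =>
    let row_len := row_len + PySem.Str.len l
    let pos := pos + 1
    if pos == num_columns then
      if row_len > max_width then true else bRows max_width num_columns rest 0 0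
    else
      bRows max_width num_columns rest row_len pos

def legend_too_long_alt (labels : List String) (num_columns : Int) : Bool :=
  if num_columns < 2 then false
  else bRows (90 - 9 * num_columns) num_columns labels 0 0

-- ===== PRECONDITION & SPEC =====
-- Pre_ excludes exactly num_columns = 0, where Python A raises ValueError (range() step 0).
def Pre_legend_too_long (labels : List String) (num_columns : Int) : Prop := num_columns ≠ 0
instance (labels : List String) (num_columns : Int) : Decidable (Pre_legend_too_long labels num_columns) := by unfold Pre_legend_too_long; infer_instance
def pvWitness_legend_too_long : List String × Int := (["ab", "cd", "ef"], 2)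

def Spec_legend_too_long (labels : List String) (num_columns : Int) (out : Bool) : Prop := out = legend_too_long_alt labels num_columns
instance (labels : List String) (num_columns : Int) (out : Bool) : Decidable (Spec_legend_too_long labels num_columns out) := by unfold Spec_legend_too_long; infer_instance

-- ===== CLAIM (what is proved, stated in full; the proofs are below) =====
def Claim_equal_legend_too_long : Prop := ∀ (labels : List String) (num_columns : Int), Dom_legend_too_long labels num_columns → Pre_legend_too_long labels num_columns → Spec_legend_too_long labels num_columns (legend_too_long labels num_columns)

-- ===== LEMMAS AND PROOFS =====

/-- Total character length of a list of labels. -/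
def sumLen (xs : List String) : Int := (xs.map (fun l => PySem.Str.len l)).sum

/-- Reference recursion: rows of `k` labels, any row's total length over `mw`. -/
def chunkRec (mw : Int) (k : Nat) : List String → Bool
  | [] => false
  | l :: rest =>
    decide (sumLen (List.take k (l :: rest)) > mw) || chunkRec mw k (rest.drop (k - 1))
termination_by xs => xs.length
decreasing_by simp

lemma pyRange_zero_nonpos (n s : Int) (hs : 0 < s) (hn : n ≤ 0) :
    PySem.List.pyRange 0 n s = [] := by
  rw [PySem.List.pyRange_of_pos _ _ hs]
  have : ¬ (0 : Int) < n := by omega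
  simp [this]

lemma pyRange_zero_cons (n s : Int) (hs : 0 < s) (hn : 0 < n) :
    PySem.List.pyRange 0 n s = 0 :: (PySem.List.pyRange 0 (n - s) s).map (· + s) := by
  rw [PySem.List.pyRange_of_pos _ _ hs, PySem.List.pyRange_of_pos _ _ hs]
  have key : (n - 0 + s - 1) / s = (n - 1) / s + 1 := by
    rw [show n - 0 + s - 1 = (n - 1) + 1 * s by ring, Int.add_mul_ediv_right _ _ (by omega : s ≠ 0)]
  have hq : 0 ≤ (n - 1) / s := Int.ediv_nonneg (by omega) (by omega)
  have c2 : (if 0 < n - s then ((n - s - 0 + s - 1) / s).toNat else 0) = ((n - 1) / s).toNat := by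
    split_ifs with h
    · congr 1; ring_nf
    · have : (n - 1) / s = 0 := Int.ediv_eq_zero_of_lt (by omega) (by omega)
      simp [this]
  have c1 : (if 0 < n then ((n - 0 + s - 1) / s).toNat else 0) = ((n - 1) / s).toNat + 1 := by
    rw [if_pos hn, key]; omega
  rw [c1, c2, List.range_succ_eq_map]
  simp only [List.map_cons, List.map_map]
  congr 1
  · simp
  · apply List.map_congr_left
    intro k _
    simp [Function.comp, Nat.succ_eq_add_one]
    ring

lemma a_chunk : ∀ (fuel : Nat) (mw nc : Int), 2 ≤ nc → ∀ (labels : List String), labels.length ≤ fuel →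
    ((PySem.List.pyRange 0 (PySem.List.len labels) nc).map
        (fun i => PySem.List.slice labels (some i) (some (i + nc)))).any
      (fun line => decide ((line.map (fun l => PySem.Str.len l)).sum > mw))
      = chunkRec mw nc.toNat labels := by
  intro fuel mw nc h2
  induction fuel with
  | zero =>
    intro labels hl
    have : labels = [] := List.length_eq_zero_iff.mp (by omega)
    subst this
    rw [PySem.List.len_eq]
    simp [pyRange_zero_nonpos 0 nc (by omega) (by omega), chunkRec]
  | succ n ih =>
    intro labels hl
    match labels with
    | [] =>
      rw [PySem.List.len_eq]
      simp [pyRange_zero_nonpos 0 nc (by omega) (by omega), chunkRec]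
    | l :: rest =>
      rw [PySem.List.len_eq,
          pyRange_zero_cons ((((l :: rest).length : Nat) : Int)) nc (by omega) (by simp)]
      simp only [List.map_cons, List.any_cons, List.map_map, List.any_map]
      -- head row: labels[0 : 0 + nc] = take nc.toNat labels
      have hhead : PySem.List.slice (l :: rest) (some 0) (some (0 + nc)) = List.take nc.toNat (l :: rest) := by
        rw [zero_add, PySem.List.slice_toNat _ (le_refl 0) (by omega)]
        simp
      -- shifted rows are rows of the dropped list
      have hshift : ∀ i ∈ PySem.List.pyRange 0 ((((l :: rest).length : Nat) : Int) - nc) nc,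
          ((fun line => decide ((line.map (fun s => PySem.Str.len s)).sum > mw)) ∘
              (fun i => PySem.List.slice (l :: rest) (some i) (some (i + nc))) ∘ (· + nc)) i
            = ((fun line => decide ((line.map (fun s => PySem.Str.len s)).sum > mw)) ∘
              (fun i => PySem.List.slice (List.drop nc.toNat (l :: rest)) (some i) (some (i + nc)))) i := by
        intro i hi
        have hi0 : 0 ≤ i := by
          rcases (PySem.List.mem_pyRange_iff_of_pos (by omega) i).mp hi with ⟨h0, _, _⟩
          omega
        have hs2 : PySem.List.slice (l :: rest) (some (i + nc)) (some (i + nc + nc))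
            = PySem.List.slice (List.drop nc.toNat (l :: rest)) (some i) (some (i + nc)) := by
          rw [PySem.List.slice_toNat _ (by omega) (by omega),
              PySem.List.slice_toNat _ (by omega) (by omega)]
          rw [List.drop_drop]
          congr 1
          · omega
          · congr 1
            omega
        simp only [Function.comp]
        simp only [hs2]
      rw [PySem.List.any_congr_mem hshift, hhead]
      by_cases hc : (((l :: rest).length : Int)) ≤ nc
      · -- single (possibly partial) row
        rw [pyRange_zero_nonpos _ nc (by omega) (by omega)]
        simp only [List.length_cons] at hc
        push_cast at hc
        have hd : rest.drop (nc.toNat - 1) = [] := List.drop_eq_nil_of_le (by omega)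
        rw [chunkRec, hd, chunkRec]
        simp [sumLen]
      · -- at least one full row, recurse on the dropped list
        push_cast at hc
        have hlen2 : (((List.drop nc.toNat (l :: rest)).length : Nat) : Int) = (((l :: rest).length : Nat) : Int) - nc := by
          simp only [List.length_drop]
          simp only [List.length_cons] at hc ⊢
          push_cast at hc ⊢
          omega
        rw [← hlen2, ← PySem.List.len_eq, ← List.any_map]
        rw [ih (List.drop nc.toNat (l :: rest)) (by simp at hl ⊢; omega)]
        have hdr : List.drop nc.toNat (l :: rest) = rest.drop (nc.toNat - 1) := by
          rw [show nc.toNat = (nc.toNat - 1) + 1 by omega, List.drop_succ_cons]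
          congr 1
        rw [hdr, chunkRec]
        simp [sumLen]

lemma bRows_step (mw nc : Int) (labels : List String) (rl p : Int)
    (h1 : 0 ≤ p) (h2 : p < nc) :
    bRows mw nc labels rl p =
      if (labels.length : Int) < nc - p then
        (decide (0 < p + labels.length) && decide (rl + sumLen labels > mw))
      else
        (decide (rl + sumLen (labels.take (nc - p).toNat) > mw) ||
          bRows mw nc (labels.drop (nc - p).toNat) 0 0) := by
  induction labels generalizing rl p with
  | nil =>
    have hc : (((List.nil : List String)).length : Int) < nc - p := by simp; omega
    simp [bRows, sumLen] <;> omega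
  | cons l rest ih =>
    by_cases hpn : p + 1 = nc
    · have hone : nc - p = 1 := by omega
      have hnotlt : ¬ (((l :: rest).length : Int) < nc - p) := by
        rw [hone]; simp only [List.length_cons]; push_cast; omega
      rw [if_neg hnotlt, hone]
      simp only [bRows, hpn, beq_self_eq_true, if_true]
      have e2 : rl + PySem.Str.len l = rl + sumLen (List.take (1 : Int).toNat (l :: rest)) := by
        simp [sumLen]
      by_cases hgt : rl + PySem.Str.len l > mw
      · rw [if_pos hgt, ← e2, decide_eq_true hgt]; simp
      · rw [if_neg hgt, ← e2, decide_eq_false hgt]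
        simp [List.drop]
    · have hlt : p + 1 < nc := by omega
      have hne : ¬ ((rl + PySem.Str.len l, p + 1).2 == nc) = true := by
        simp; omega
      simp only [bRows]
      rw [if_neg (by simp; omega : ¬ ((p + 1) == nc) = true)]
      rw [ih (rl + PySem.Str.len l) (p + 1) (by omega) hlt]
      by_cases hc : ((rest.length : Int)) < nc - (p + 1)
      · rw [if_pos hc, if_pos (by simp only [List.length_cons] at hc ⊢; push_cast at hc ⊢; omega)]
        have e1 : decide (0 < p + 1 + (rest.length : Int)) = decide (0 < p + (((l :: rest).length : Int))) := by
          rw [decide_eq_decide]; simp only [List.length_cons]; push_cast; omega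
        have e2 : rl + PySem.Str.len l + sumLen rest = rl + sumLen (l :: rest) := by
          simp [sumLen]; ring
        rw [e1, e2]
      · rw [if_neg hc, if_neg (by simp only [List.length_cons] at hc ⊢; push_cast at hc ⊢; omega)]
        have ht : (nc - p).toNat = (nc - (p + 1)).toNat + 1 := by omega
        rw [ht]
        simp only [List.take_succ_cons, List.drop_succ_cons]
        have e2 : rl + PySem.Str.len l + sumLen (rest.take (nc - (p + 1)).toNat) = rl + sumLen (l :: rest.take (nc - (p + 1)).toNat) := by
          simp [sumLen]; ring
        rw [e2]
        rfl

lemma b_chunk : ∀ (fuel : Nat) (mw nc : Int), 2 ≤ nc → ∀ (labels : List String), labels.length ≤ fuel →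
    bRows mw nc labels 0 0 = chunkRec mw nc.toNat labels := by
  intro fuel mw nc h2
  induction fuel with
  | zero =>
    intro labels hl
    have : labels = [] := List.length_eq_zero_iff.mp (by omega)
    subst this
    simp [bRows, chunkRec]
  | succ n ih =>
    intro labels hl
    match labels with
    | [] => simp [bRows, chunkRec]
    | l :: rest =>
      rw [bRows_step mw nc (l :: rest) 0 0 (le_refl 0) (by omega)]
      simp only [sub_zero]
      by_cases hc : (((l :: rest).length : Int)) < nc
      · rw [if_pos hc]
        simp only [List.length_cons] at hc
        push_cast at hc
        have hd : rest.drop (nc.toNat - 1) = [] := List.drop_eq_nil_of_le (by omega)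
        have htake : List.take nc.toNat (l :: rest) = l :: rest := List.take_of_length_le (by simp; omega)
        rw [chunkRec, hd, chunkRec]
        rw [htake]
        simp
      · rw [if_neg hc]
        simp only [List.length_cons] at hc
        push_cast at hc
        have hdr : List.drop nc.toNat (l :: rest) = rest.drop (nc.toNat - 1) := by
          rw [show nc.toNat = (nc.toNat - 1) + 1 by omega, List.drop_succ_cons]
          congr 1
        rw [hdr, ih (rest.drop (nc.toNat - 1)) (by simp at hl ⊢; omega), chunkRec]
        simp

-- ===== VERDICT (by name: the statement is the Claim_ definition above) =====
theorem legend_too_long_spec : Claim_equal_legend_too_long := by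
  intro labels nc _ hpre
  unfold Spec_legend_too_long legend_too_long legend_too_long_alt
  rcases lt_trichotomy nc 2 with h | h | h
  · -- nc ∈ {negative, 1} (0 excluded by Pre_)
    have hne : nc ≠ 0 := hpre
    by_cases h1 : nc = 1
    · simp [h1]
    · have hlt : nc < 0 := by omega
      have hemp : PySem.List.pyRange 0 ((labels.length : Int)) nc = [] := by
        rw [PySem.List.pyRange]
        have hs0 : nc ≠ 0 := hne
        have h0 : ¬ (0 : Int) < nc := by omega
        have hlen : ¬ ((labels.length : Int)) < 0 := by omega
        simp [hs0, h0, hlen]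
      simp [h1, show nc < 2 by omega, PySem.List.len_eq, hemp]
  all_goals {
    have h2 : 2 ≤ nc := by omega
    have hne1 : nc ≠ 1 := by omega
    have hnlt : ¬ nc < 2 := by omega
    simp only [hne1, beq_iff_eq, if_false, if_neg hnlt]
    rw [a_chunk labels.length _ nc h2 labels (le_refl _),
        b_chunk labels.length _ nc h2 labels (le_refl _)]
  }
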